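-- pv_equiv track=rewrite | github.com/zp001/es_material_search | es_search/material_data_process/get_result_data/comput_similarity.py | get_data_dic
-- ===== SOURCE A (Python) =====
-- def get_data_dic(big_category_data,mid_category_data,small_category_data):
--     mid_cat_data=[]
--     mid_cat_code = []
--     for m in mid_category_data:
--         dic_data = {}
--         dic_code={}
--         dic_code.setdefault(m[0], [])
--         dic_data.setdefault(m[1], [])
--         mid_cat_data.append(dic_data)
--         mid_cat_code.append(dic_code)
--
--     for i in range(len(mid_cat_code)):
--         c=mid_cat_code[i].keys()
--         c=list(c)
--         d=mid_cat_data[i].keys()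
--         d=list(d)
--         for s in small_category_data:
--             sc=str(s[0])
--             scj=''
--             if len(sc)==6:
--                 scj=sc[:4]
--             if len(sc)==5:
--                 scj = sc[:3]
--             if scj == str(c[0]):
--                 mid_cat_code[i].setdefault(c[0], []).append(s[0])
--                 mid_cat_data[i].setdefault(d[0], []).append(s[1])
--                 #small_category_data.remove(s)
--
--     all_data=[]
--     all_code=[]
--     for b in big_category_data:
--         child_data={}
--         child_code={}
--         for j in range(len(mid_cat_data)):
--             ck=mid_cat_code[j].keys()
--             ck=list(ck)
--             ck=str(ck[0])
--             p=''
--             if len(ck)==4: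
--                 p=ck[:2]
--             if len(ck)==3:
--                 p = ck[:1]
--             if p==str(b[0]):
--                 child_data.setdefault(b[1], []).append(mid_cat_data[j])
--                 child_code.setdefault(b[0], []).append(mid_cat_code[j])
--
--         all_data.append(child_data)
--         all_code.append(child_code)
--
--     return all_data,all_code
-- ===== SOURCE B (Python) =====
-- def get_data_dic(big_category_data, mid_category_data, small_category_data):
--     # Bucket small categories once by their parent-prefix key (4 chars of a 6-char
--     # code, 3 of a 5-char code, '' otherwise); each mid then looks its children up
--     # in O(1) instead of rescanning the whole small list.
--     small_buckets = {}
--     for s in small_category_data: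
--         sc = str(s[0])
--         if len(sc) == 6:
--             key = sc[:4]
--         elif len(sc) == 5:
--             key = sc[:3]
--         else:
--             key = ''
--         small_buckets.setdefault(key, []).append(s)
--
--     # Bucket the (already enriched) mid categories by their big-prefix key
--     # (2 chars of a 4-char code, 1 of a 3-char code, '' otherwise).
--     mid_buckets = {}
--     for code, name in mid_category_data:
--         kids = small_buckets.get(str(code), [])
--         data_dic = {name: [k[1] for k in kids]}
--         code_dic = {code: [k[0] for k in kids]}
--         if len(code) == 4:
--             p = code[:2]
--         elif len(code) == 3:
--             p = code[:1]
--         else: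
--             p = ''
--         mid_buckets.setdefault(p, []).append((data_dic, code_dic))
--
--     all_data = []
--     all_code = []
--     for code, name in big_category_data:
--         children = mid_buckets.get(str(code), [])
--         all_data.append({name: [c[0] for c in children]} if children else {})
--         all_code.append({code: [c[1] for c in children]} if children else {})
--     return all_data, all_code
-- ===== Notes on version B (the rewrite author's own statement) =====
-- stated objective: faster
-- what changed: B buckets the small categories by their code-prefix key and the mid categories by their big-prefix key into one dict each, so every parent finds its children with a single O(1) lookup instead of A's rescan of the whole small list per mid and of the whole mid list per big.
import Mathlib
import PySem

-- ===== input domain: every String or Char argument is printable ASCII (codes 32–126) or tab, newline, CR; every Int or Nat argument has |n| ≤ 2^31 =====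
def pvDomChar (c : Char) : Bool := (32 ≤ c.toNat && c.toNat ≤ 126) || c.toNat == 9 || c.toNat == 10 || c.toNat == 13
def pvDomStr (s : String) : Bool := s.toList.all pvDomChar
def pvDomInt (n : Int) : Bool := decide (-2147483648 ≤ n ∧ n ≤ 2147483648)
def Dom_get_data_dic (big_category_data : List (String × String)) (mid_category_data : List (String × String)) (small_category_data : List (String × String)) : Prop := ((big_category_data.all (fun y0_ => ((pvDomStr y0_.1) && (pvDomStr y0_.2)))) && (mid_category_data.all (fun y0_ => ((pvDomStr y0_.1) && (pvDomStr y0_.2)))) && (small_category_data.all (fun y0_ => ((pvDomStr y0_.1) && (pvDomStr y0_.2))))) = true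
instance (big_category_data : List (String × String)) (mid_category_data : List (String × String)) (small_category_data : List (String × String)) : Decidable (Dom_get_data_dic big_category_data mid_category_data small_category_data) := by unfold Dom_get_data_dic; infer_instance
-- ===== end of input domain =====

-- B buckets the small and mid categories by their prefix key once (one dict each), replacing
-- A's rescan of the whole small list per mid and of the whole mid list per big.

-- ===== PORT A =====
-- A's dicts all have at most one key: each per-mid dict is created as {key: []} and only that key is
-- ever extended, so it is ported as the single pair (key, values); `d.setdefault(k, []).append(v)` on
-- the per-big child dicts is ported as `PySem.Dict.modify k [] (· ++ [v])` (d[k] = d.get(k, []) + [v],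
-- exactly what setdefault-then-append does).  The `for i/j in range(len(...))` loops read and write
-- only position i of the two parallel lists, rendered as a map/fold over the zipped lists.
def get_data_dic (big_category_data : List (String × String)) (mid_category_data : List (String × String)) (small_category_data : List (String × String)) : (List (List (String × List (List (String × List String))))) × (List (List (String × List (List (String × List String))))) :=
  let mid_cat_data : List (String × List String) := mid_category_data.map (fun m => (m.2, []))
  let mid_cat_code : List (String × List String) := mid_category_data.map (fun m => (m.1, []))
  let upd : List ((String × List String) × (String × List String)) :=
    (mid_cat_code.zip mid_cat_data).map (fun cd =>
      small_category_data.foldl (fun (st : (String × List String) × (String × List String)) s =>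
        let sc := s.1
        let scj : String := if PySem.Str.len sc = 6 then PySem.Str.slice sc none (some 4) else ""
        let scj : String := if PySem.Str.len sc = 5 then PySem.Str.slice sc none (some 3) else scj
        if scj = st.1.1 then
          ((st.1.1, st.1.2 ++ [s.1]), (st.2.1, st.2.2 ++ [s.2]))
        else st) cd)
  let mid_cat_code2 : List (String × List String) := upd.map (·.1)
  let mid_cat_data2 : List (String × List String) := upd.map (·.2)
  big_category_data.foldl (fun acc b =>
    let ch := (mid_cat_code2.zip mid_cat_data2).foldl
      (fun (ch : PySem.Dict String (List (List (String × List String))) × PySem.Dict String (List (List (String × List String)))) mj =>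
        let ck := mj.1.1
        let p : String := if PySem.Str.len ck = 4 then PySem.Str.slice ck none (some 2) else ""
        let p : String := if PySem.Str.len ck = 3 then PySem.Str.slice ck none (some 1) else p
        if p = b.1 then
          (ch.1.modify b.2 [] (· ++ [[mj.2]]), ch.2.modify b.1 [] (· ++ [[mj.1]]))
        else ch) (PySem.Dict.empty, PySem.Dict.empty)
    (acc.1 ++ [ch.1.items], acc.2 ++ [ch.2.items])) ([], [])

-- ===== PORT B =====
def get_data_dic_alt (big_category_data : List (String × String)) (mid_category_data : List (String × String)) (small_category_data : List (String × String)) : (List (List (String × List (List (String × List String))))) × (List (List (String × List (List (String × List String))))) :=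
  let small_buckets : PySem.Dict String (List (String × String)) :=
    small_category_data.foldl (fun d s =>
      let key : String :=
        if PySem.Str.len s.1 = 6 then PySem.Str.slice s.1 none (some 4)
        else if PySem.Str.len s.1 = 5 then PySem.Str.slice s.1 none (some 3)
        else ""
      d.modify key [] (· ++ [s])) PySem.Dict.empty
  let mid_buckets : PySem.Dict String (List ((String × List String) × (String × List String))) :=
    mid_category_data.foldl (fun d m =>
      let kids := small_buckets.getD m.1 []
      let p : String :=
        if PySem.Str.len m.1 = 4 then PySem.Str.slice m.1 none (some 2)
        else if PySem.Str.len m.1 = 3 then PySem.Str.slice m.1 none (some 1)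
        else ""
      d.modify p [] (· ++ [((m.2, kids.map (·.2)), (m.1, kids.map (·.1)))])) PySem.Dict.empty
  big_category_data.foldl (fun acc b =>
    let children := mid_buckets.getD b.1 []
    (acc.1 ++ [if children.isEmpty then [] else [(b.2, children.map (fun c => [c.1]))]],
     acc.2 ++ [if children.isEmpty then [] else [(b.1, children.map (fun c => [c.2]))]])) ([], [])

-- ===== PRECONDITION & SPEC =====
def Spec_get_data_dic (big_category_data : List (String × String)) (mid_category_data : List (String × String)) (small_category_data : List (String × String)) (out : (List (List (String × List (List (String × List String))))) × (List (List (String × List (List (String × List String)))))) : Prop := out = get_data_dic_alt big_category_data mid_category_data small_category_data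
instance (big_category_data : List (String × String)) (mid_category_data : List (String × String)) (small_category_data : List (String × String)) (out : (List (List (String × List (List (String × List String))))) × (List (List (String × List (List (String × List String)))))) : Decidable (Spec_get_data_dic big_category_data mid_category_data small_category_data out) := by
  unfold Spec_get_data_dic
  letI i1 : DecidableEq (String × List (List (String × List String))) := inferInstance
  letI i2 : DecidableEq (List (String × List (List (String × List String)))) := inferInstance
  letI i3 : DecidableEq (List (List (String × List (List (String × List String))))) := inferInstance
  infer_instance

-- ===== CLAIM (what is proved, stated in full; the proofs are below) =====
def Claim_equal_get_data_dic : Prop := ∀ (big_category_data : List (String × String)) (mid_category_data : List (String × String)) (small_category_data : List (String × String)), Dom_get_data_dic big_category_data mid_category_data small_category_data → Spec_get_data_dic big_category_data mid_category_data small_category_data (get_data_dic big_category_data mid_category_data small_category_data)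

-- ===== LEMMAS AND PROOFS =====

-- the prefix key of a small-category code (4 chars of a 6-char code, 3 of a 5-char one)
def pvSmallKey (sc : String) : String :=
  if PySem.Str.len sc = 6 then PySem.Str.slice sc none (some 4)
  else if PySem.Str.len sc = 5 then PySem.Str.slice sc none (some 3)
  else ""

-- the prefix key of a mid-category code (2 chars of a 4-char code, 1 of a 3-char one)
def pvMidKey (ck : String) : String :=
  if PySem.Str.len ck = 4 then PySem.Str.slice ck none (some 2)
  else if PySem.Str.len ck = 3 then PySem.Str.slice ck none (some 1)
  else ""

-- A's sequential overwriting of scj / p computes exactly the same keys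
theorem pvScjChain (sc : String) :
    (if PySem.Str.len sc = 5 then PySem.Str.slice sc none (some 3)
     else if PySem.Str.len sc = 6 then PySem.Str.slice sc none (some 4) else "")
      = pvSmallKey sc := by
  unfold pvSmallKey; split_ifs <;> simp_all

theorem pvPChain (ck : String) :
    (if PySem.Str.len ck = 3 then PySem.Str.slice ck none (some 1)
     else if PySem.Str.len ck = 4 then PySem.Str.slice ck none (some 2) else "")
      = pvMidKey ck := by
  unfold pvMidKey; split_ifs <;> simp_all

-- the small categories whose prefix key is c, in input order
def pvKids (small : List (String × String)) (c : String) : List (String × String) :=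
  small.filter (fun s => pvSmallKey s.1 = c)

-- a single-key dict holding vs under k (empty when vs is empty)
def pvDictOf {ν : Type} (k : String) (vs : List ν) : PySem.Dict String (List ν) :=
  if vs.isEmpty then PySem.Dict.empty else PySem.Dict.mk [(k, vs)]

theorem pvModify_dictOf {ν : Type} (k : String) (vs : List ν) (v : ν) :
    (pvDictOf k vs).modify k [] (· ++ [v]) = pvDictOf k (vs ++ [v]) := by
  cases vs <;>
    simp [pvDictOf, PySem.Dict.modify, PySem.Dict.insert, PySem.Dict.contains,
      PySem.Dict.getD, PySem.Dict.get?, PySem.Dict.empty]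

theorem pvItems_dictOf {ν : Type} (k : String) (vs : List ν) :
    (pvDictOf k vs).items = if vs.isEmpty then [] else [(k, vs)] := by
  cases vs <;> simp [pvDictOf, PySem.Dict.empty]

-- a bucket-building fold looked up at one key is the filtered, mapped input list
theorem pvBucket_getD {α ν : Type} (xs : List α) (f : α → String) (g : α → ν) (k : String) :
    (xs.foldl (fun d x => d.modify (f x) [] (· ++ [g x])) PySem.Dict.empty).getD k []
      = (xs.filter (fun x => f x = k)).map g := by
  have h : xs.foldl (fun d x => d.modify (f x) [] (· ++ [g x])) PySem.Dict.empty
      = (xs.map (fun x => (f x, g x))).foldl (fun d p => d.modify p.1 [] (· ++ [p.2])) PySem.Dict.empty := by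
    rw [List.foldl_map]
  rw [h, PySem.Dict.getD_foldl_modify_append]
  have : (fun p : String × ν => p.1 == k) ∘ (fun x => (f x, g x)) = fun x => decide (f x = k) := by
    funext x
    simp only [Function.comp_apply]
    cases hfk : decide (f x = k) <;> simp_all
  simp [PySem.Dict.getD_empty, List.filter_map, this, List.map_map, Function.comp_def]

-- A's per-mid scan of the small list collects exactly the matching codes and names
theorem pvMidScan (small : List (String × String)) (c0 d0 : String) (cs ds : List String) :
    small.foldl (fun (st : (String × List String) × (String × List String)) s =>
        if pvSmallKey s.1 = st.1.1 then
          ((st.1.1, st.1.2 ++ [s.1]), (st.2.1, st.2.2 ++ [s.2]))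
        else st) ((c0, cs), (d0, ds))
      = ((c0, cs ++ (pvKids small c0).map (·.1)), (d0, ds ++ (pvKids small c0).map (·.2))) := by
  induction small generalizing cs ds with
  | nil => simp [pvKids]
  | cons s t ih =>
    simp only [List.foldl_cons]
    by_cases hm : pvSmallKey s.1 = c0
    · rw [if_pos hm, ih]
      simp [pvKids, hm]
    · rw [if_neg hm, ih]
      simp [pvKids, hm]

-- A's per-big scan of the mids builds a pair of single-key dicts over the matching mids
theorem pvBigScan {α ν : Type} (zs : List α) (P : α → Prop) [DecidablePred P]
    (g h : α → ν) (k1 k2 : String) (us : List α) :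
    zs.foldl (fun (ch : PySem.Dict String (List ν) × PySem.Dict String (List ν)) z =>
        if P z then (ch.1.modify k1 [] (· ++ [g z]), ch.2.modify k2 [] (· ++ [h z])) else ch)
      (pvDictOf k1 (us.map g), pvDictOf k2 (us.map h))
      = (pvDictOf k1 ((us ++ zs.filter (fun z => P z)).map g),
         pvDictOf k2 ((us ++ zs.filter (fun z => P z)).map h)) := by
  induction zs generalizing us with
  | nil => simp
  | cons z t ih =>
    simp only [List.foldl_cons]
    by_cases hp : P z
    · rw [if_pos hp, pvModify_dictOf, pvModify_dictOf,
        show (us.map g) ++ [g z] = (us ++ [z]).map g by simp,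
        show (us.map h) ++ [h z] = (us ++ [z]).map h by simp,
        ih (us ++ [z])]
      simp [hp]
    · rw [if_neg hp, ih us]
      simp [hp]

theorem pvBigScan0 {α ν : Type} (zs : List α) (P : α → Prop) [DecidablePred P]
    (g h : α → ν) (k1 k2 : String) :
    zs.foldl (fun (ch : PySem.Dict String (List ν) × PySem.Dict String (List ν)) z =>
        if P z then (ch.1.modify k1 [] (· ++ [g z]), ch.2.modify k2 [] (· ++ [h z])) else ch)
      (PySem.Dict.empty, PySem.Dict.empty)
      = (pvDictOf k1 ((zs.filter (fun z => P z)).map g),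
         pvDictOf k2 ((zs.filter (fun z => P z)).map h)) := by
  have h0 : ((pvDictOf k1 ((([] : List α)).map g), pvDictOf k2 ((([] : List α)).map h))
      : PySem.Dict String (List ν) × PySem.Dict String (List ν))
      = (PySem.Dict.empty, PySem.Dict.empty) := by simp [pvDictOf]
  rw [← h0]
  simpa using pvBigScan zs P g h k1 k2 []

-- folding the literal if-chains back into the named key functions
theorem pvSmallKey_fold (sc : String) :
    (if PySem.Str.len sc = 6 then PySem.Str.slice sc none (some 4)
     else if PySem.Str.len sc = 5 then PySem.Str.slice sc none (some 3) else "") = pvSmallKey sc := rfl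

theorem pvMidKey_fold (ck : String) :
    (if PySem.Str.len ck = 4 then PySem.Str.slice ck none (some 2)
     else if PySem.Str.len ck = 3 then PySem.Str.slice ck none (some 1) else "") = pvMidKey ck := rfl

theorem pvKids_fold (small : List (String × String)) (c : String) :
    List.filter (fun s => decide (pvSmallKey s.1 = c)) small = pvKids small c := rfl

-- ===== VERDICT (by name: the statement is the Claim_ definition above) =====
theorem get_data_dic_spec : Claim_equal_get_data_dic := by
  intro big mid small _
  unfold Spec_get_data_dic get_data_dic get_data_dic_alt
  simp only [List.zip_map', List.map_map, Function.comp_def, pvScjChain, pvPChain,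
    pvSmallKey_fold, pvMidKey_fold, pvMidScan, List.nil_append, List.foldl_map,
    pvBucket_getD, pvKids_fold, pvBigScan0, pvItems_dictOf, List.isEmpty_map]
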